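-- pv_equiv track=rewrite | github.com/Sheel-ui/Analysis-of-Algorithms | Project II/app.py | alg6
-- ===== SOURCE A (Python) =====
-- def alg6(matrix,h,k):
--     max_allowed_less_than_threshold = k
--     i1,j1,i2,j2 = None, None, None, None
--     maxSquareSize = 0
--     rows = len(matrix)
--     cols = len(matrix[0])
--     for i in range(rows):
--         for j in range(cols):
--             # above for loop for selecting each element
--             for k in range(rows):
--                 for l in range(cols):
--                     # above for loops for selecting each corner of submatrix
--                     squareSize = 0
--                     # calculating number of elements less than threshold
--                     if k-i == l-j and k-i>=0:
--                         squareSize = k-i+1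
--                         less_than_threshold_count = 0
--                         for x in range(i, i+squareSize):
--                             for y in range(j, j+squareSize):
--                                 if matrix[x][y] < h:
--                                     less_than_threshold_count += 1
--                         # checking if number of elements less than threshold is a less max allowed elements
--                         if less_than_threshold_count<=max_allowed_less_than_threshold:
--                             if squareSize >= maxSquareSize:
--                                 maxSquareSize = squareSize
--                                 i1, j1 = i+1, j+1
--                                 i2, j2 = i+maxSquareSize, j+maxSquareSize
--     return i1,j1,i2,j2
-- ===== SOURCE B (Python) =====
-- def alg6(matrix, h, k):
--     rows = len(matrix)
--     cols = len(matrix[0])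
--     # P[x][y] = number of elements < h in the rectangle matrix[0:x][0:y]
--     P = [[0] * (cols + 1)]
--     for x in range(rows):
--         prev = P[x]
--         row = [0] * (cols + 1)
--         for y in range(cols):
--             row[y + 1] = prev[y + 1] + row[y] - prev[y] + (1 if matrix[x][y] < h else 0)
--         P.append(row)
--     best = 0
--     res = (None, None, None, None)
--     for i in range(rows):
--         for j in range(cols):
--             for s in range(1, min(rows - i, cols - j) + 1):
--                 cnt = P[i + s][j + s] - P[i][j + s] - P[i + s][j] + P[i][j]
--                 if cnt <= k and s >= best:
--                     best = s
--                     res = (i + 1, j + 1, i + s, j + s)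
--     return res
-- ===== Notes on version B (the rewrite author's own statement) =====
-- stated objective: faster
-- what changed: Replaced A's six nested loops (all corner pairs, each square recounted cell by cell) with a 2D prefix-sum table of below-threshold flags so each square's count is an O(1) inclusion-exclusion lookup, keeping A's corner iteration order and >= tie-breaking.
import Mathlib
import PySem

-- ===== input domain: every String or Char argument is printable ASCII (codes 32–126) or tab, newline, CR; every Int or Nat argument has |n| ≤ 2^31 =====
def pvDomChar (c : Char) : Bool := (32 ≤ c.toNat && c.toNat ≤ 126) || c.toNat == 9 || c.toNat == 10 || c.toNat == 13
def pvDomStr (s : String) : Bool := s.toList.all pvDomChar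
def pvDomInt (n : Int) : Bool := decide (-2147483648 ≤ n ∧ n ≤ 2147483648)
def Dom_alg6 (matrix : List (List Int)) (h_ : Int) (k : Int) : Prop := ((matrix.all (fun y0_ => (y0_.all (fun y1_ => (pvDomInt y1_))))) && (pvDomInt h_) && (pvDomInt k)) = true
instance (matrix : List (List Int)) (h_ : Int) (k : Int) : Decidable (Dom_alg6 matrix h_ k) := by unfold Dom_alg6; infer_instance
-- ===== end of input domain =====

-- B replaces A's O(n^6) scan of all corner pairs by a 2D prefix-sum table of below-threshold
-- flags, giving each square's count in O(1); same corner/tie-breaking order (objective: faster).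

-- matrix[x][y] for 0 ≤ x < len(matrix), 0 ≤ y < len(matrix[x]); the default is never
-- reached on the indices the ports use under Pre_alg6 (exact there).
def pvIdx (m : List (List Int)) (x y : Int) : Int :=
  PySem.List.pyGetD (PySem.List.pyGetD m x []) y 0

-- ===== PORT A =====
def alg6 (matrix : List (List Int)) (h_ : Int) (k : Int) : List (Option Int) :=
  let maxAllowed := k                                   -- max_allowed_less_than_threshold
  let rows : Int := (matrix.length : Int)
  let cols : Int := ((PySem.List.pyGetD matrix 0 []).length : Int)   -- len(matrix[0]); [] only outside Pre_
  let st :=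
    (PySem.List.pyRange 0 rows 1).foldl
      (fun st i =>
        (PySem.List.pyRange 0 cols 1).foldl
          (fun st j =>
            (PySem.List.pyRange 0 rows 1).foldl
              (fun st kk =>    -- Python's shadowing loop variable k
                (PySem.List.pyRange 0 cols 1).foldl
                  (fun st l =>
                    if kk - i = l - j ∧ kk - i ≥ 0 then
                      let s := kk - i + 1                -- squareSize
                      let cnt := (PySem.List.pyRange i (i + s) 1).foldl
                        (fun c x =>
                          (PySem.List.pyRange j (j + s) 1).foldl
                            (fun c y => if pvIdx matrix x y < h_ then c + 1 else c) c)
                        0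
                      if cnt ≤ maxAllowed then
                        if s ≥ st.2.2.2.2 then
                          (some (i + 1), some (j + 1), some (i + s), some (j + s), s)
                        else st
                      else st
                    else st)
                  st)
              st)
          st)
      ((none, none, none, none, 0) :
        Option Int × Option Int × Option Int × Option Int × Int)   -- (i1, j1, i2, j2, maxSquareSize)
  [st.1, st.2.1, st.2.2.1, st.2.2.2.1]

-- ===== PORT B =====
-- row[y+1] = prev[y+1] + row[y] - prev[y] + (1 if matrix[x][y] < h else 0); Python preallocates
-- [0]*(cols+1) and fills left to right, each slot written once before read: ported as appends.
def pvBuildRow (matrix : List (List Int)) (h_ cols x : Int) (prev : List Int) : List Int :=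
  (PySem.List.pyRange 0 cols 1).foldl (fun row y =>
    row ++ [PySem.List.pyGetD prev (y + 1) 0 + PySem.List.pyGetD row y 0
            - PySem.List.pyGetD prev y 0
            + (if pvIdx matrix x y < h_ then 1 else 0)]) [0]

def alg6_alt (matrix : List (List Int)) (h_ : Int) (k : Int) : List (Option Int) :=
  let rows : Int := (matrix.length : Int)
  let cols : Int := ((PySem.List.pyGetD matrix 0 []).length : Int)
  let P := (PySem.List.pyRange 0 rows 1).foldl
      (fun P x => P ++ [pvBuildRow matrix h_ cols x (PySem.List.pyGetD P x [])])
      [List.replicate (cols + 1).toNat 0]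
  let st := (PySem.List.pyRange 0 rows 1).foldl (fun st i =>
      (PySem.List.pyRange 0 cols 1).foldl (fun st j =>
        (PySem.List.pyRange 1 (min (rows - i) (cols - j) + 1) 1).foldl (fun st s =>
          let cnt := pvIdx P (i + s) (j + s) - pvIdx P i (j + s)
                     - pvIdx P (i + s) j + pvIdx P i j
          if cnt ≤ k ∧ s ≥ st.1 then
            (s, (some (i + 1), some (j + 1), some (i + s), some (j + s)))
          else st) st) st)
      ((0, (none, none, none, none)) :
        Int × (Option Int × Option Int × Option Int × Option Int))   -- (best, res)
  [st.2.1, st.2.2.1, st.2.2.2.1, st.2.2.2.2]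

-- ===== PRECONDITION & SPEC =====
-- Pre_ excludes exactly the inputs where Python A raises IndexError: the empty matrix
-- (matrix[0]) and matrices with a row shorter than row 0 (matrix[x][y] with y < len(matrix[0])).
def Pre_alg6 (matrix : List (List Int)) (h_ : Int) (k : Int) : Prop :=
  matrix ≠ [] ∧ ∀ row ∈ matrix, (matrix.headD []).length ≤ row.length
instance (matrix : List (List Int)) (h_ : Int) (k : Int) : Decidable (Pre_alg6 matrix h_ k) := by
  unfold Pre_alg6; infer_instance
def pvWitness_alg6 : List (List Int) × Int × Int := ([[1, 2], [3, 4]], 2, 1)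

def Spec_alg6 (matrix : List (List Int)) (h_ : Int) (k : Int) (out : List (Option Int)) : Prop := out = alg6_alt matrix h_ k
instance (matrix : List (List Int)) (h_ : Int) (k : Int) (out : List (Option Int)) : Decidable (Spec_alg6 matrix h_ k out) := by unfold Spec_alg6; infer_instance

-- ===== CLAIM (what is proved, stated in full; the proofs are below) =====
def Claim_equal_alg6 : Prop := ∀ (matrix : List (List Int)) (h_ : Int) (k : Int), Dom_alg6 matrix h_ k → Pre_alg6 matrix h_ k → Spec_alg6 matrix h_ k (alg6 matrix h_ k)

-- ===== LEMMAS AND PROOFS =====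

-- indicator of "matrix[x][y] < h"
def pvInd (m : List (List Int)) (h_ x y : Int) : Int := if pvIdx m x y < h_ then 1 else 0
-- sum of indicators over one row segment [a, b)
def pvS (m : List (List Int)) (h_ x a b : Int) : Int :=
  ((PySem.List.pyRange a b 1).map (pvInd m h_ x)).sum
-- count of below-threshold cells in the rectangle [0, a) × [0, b)
def pvC (m : List (List Int)) (h_ a b : Int) : Int :=
  ((PySem.List.pyRange 0 a 1).map (fun x => pvS m h_ x 0 b)).sum
-- the intended row a of the prefix table
def pvRowC (m : List (List Int)) (h_ cols a : Int) : List Int :=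
  (PySem.List.pyRange 0 (cols + 1) 1).map (fun b => pvC m h_ a b)

lemma pvS_split (m : List (List Int)) (h_ x : Int) {a c b : Int} (h1 : a ≤ c) (h2 : c ≤ b) :
    pvS m h_ x a b = pvS m h_ x a c + pvS m h_ x c b := by
  unfold pvS
  rw [PySem.List.pyRange_one_append a c b h1 h2, List.map_append, List.sum_append]

lemma pvS_succ (m : List (List Int)) (h_ x : Int) {a b : Int} (h1 : a ≤ b) :
    pvS m h_ x a (b + 1) = pvS m h_ x a b + pvInd m h_ x b := by
  unfold pvS
  rw [PySem.List.pyRange_one_succ_right h1, List.map_append, List.sum_append]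
  simp

lemma pvC_split (m : List (List Int)) (h_ : Int) {a : Int} (b : Int) (ha : 0 ≤ a) {c : Int} (hc : a ≤ c) :
    pvC m h_ c b = pvC m h_ a b + ((PySem.List.pyRange a c 1).map (fun x => pvS m h_ x 0 b)).sum := by
  unfold pvC
  rw [PySem.List.pyRange_one_append 0 a c ha hc, List.map_append, List.sum_append]

lemma pvC_succ (m : List (List Int)) (h_ : Int) {a : Int} (b : Int) (ha : 0 ≤ a) :
    pvC m h_ (a + 1) b = pvC m h_ a b + pvS m h_ a 0 b := by
  unfold pvC
  rw [PySem.List.pyRange_one_succ_right ha, List.map_append, List.sum_append]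
  simp

lemma pvC_rec (m : List (List Int)) (h_ : Int) {x y : Int} (hx : 0 ≤ x) (hy : 0 ≤ y) :
    pvC m h_ (x + 1) (y + 1) = pvC m h_ x (y + 1) + pvC m h_ (x + 1) y - pvC m h_ x y + pvInd m h_ x y := by
  rw [pvC_succ m h_ (y + 1) hx, pvC_succ m h_ y hx, pvS_succ m h_ x hy]
  ring

-- inclusion–exclusion: the prefix-table expression equals the rectangle sum
lemma pvC_rect (m : List (List Int)) (h_ : Int) {i j s : Int} (hi : 0 ≤ i) (hj : 0 ≤ j) (hs : 0 ≤ s) :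
    pvC m h_ (i + s) (j + s) - pvC m h_ i (j + s) - pvC m h_ (i + s) j + pvC m h_ i j
      = ((PySem.List.pyRange i (i + s) 1).map (fun x => pvS m h_ x j (j + s))).sum := by
  rw [pvC_split m h_ (j + s) hi (by omega : i ≤ i + s),
      pvC_split m h_ j hi (by omega : i ≤ i + s)]
  have hsplit : ∀ x, pvS m h_ x 0 (j + s) = pvS m h_ x 0 j + pvS m h_ x j (j + s) := fun x =>
    pvS_split m h_ x hj (by omega)
  calc pvC m h_ i (j + s) + ((PySem.List.pyRange i (i + s) 1).map (fun x => pvS m h_ x 0 (j + s))).sum -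
        pvC m h_ i (j + s) - (pvC m h_ i j + ((PySem.List.pyRange i (i + s) 1).map (fun x => pvS m h_ x 0 j)).sum) +
        pvC m h_ i j
      = ((PySem.List.pyRange i (i + s) 1).map (fun x => pvS m h_ x 0 j + pvS m h_ x j (j + s))).sum -
        ((PySem.List.pyRange i (i + s) 1).map (fun x => pvS m h_ x 0 j)).sum := by
        rw [List.map_congr_left (fun x _ => hsplit x)]; ring
    _ = _ := by rw [PySem.List.sum_map_add_int]; ring

lemma pvCntA_eq (m : List (List Int)) (h_ : Int) (i j s : Int) :
    ((PySem.List.pyRange i (i + s) 1).foldl (fun c x =>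
        (PySem.List.pyRange j (j + s) 1).foldl (fun c y =>
          if pvIdx m x y < h_ then c + 1 else c) c) 0)
      = ((PySem.List.pyRange i (i + s) 1).map (fun x => pvS m h_ x j (j + s))).sum := by
  have hin : ∀ (c x : Int),
      ((PySem.List.pyRange j (j + s) 1).foldl (fun c y =>
        if pvIdx m x y < h_ then c + 1 else c) c) = c + pvS m h_ x j (j + s) := by
    intro c x
    rw [PySem.List.foldl_ite_add_one (fun y => pvIdx m x y < h_)]
    congr 1
    unfold pvS pvInd
    rw [← PySem.List.sum_map_ite_one_zero (fun y => decide (pvIdx m x y < h_))]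
    simp
  rw [PySem.List.foldl_congr_mem _ _ (fun c x => c + pvS m h_ x j (j + s)) 0
        (fun acc x _ => hin acc x),
      PySem.List.foldl_add]
  simp

lemma pvC_b0 (m : List (List Int)) (h_ a : Int) : pvC m h_ a 0 = 0 := by
  unfold pvC pvS
  rw [PySem.List.pyRange_one_eq_nil (le_refl 0)]
  simp

lemma pvBuildRow_aux (m : List (List Int)) (h_ : Int) (cols x : Int) (hx : 0 ≤ x) :
    ∀ t : Nat, (t : Int) ≤ cols →
      ((List.range t).foldl (fun row (kk : Nat) =>
          row ++ [PySem.List.pyGetD (pvRowC m h_ cols x) ((kk : Int) + 1) 0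
                  + PySem.List.pyGetD row (kk : Int) 0
                  - PySem.List.pyGetD (pvRowC m h_ cols x) (kk : Int) 0
                  + (if pvIdx m x (kk : Int) < h_ then 1 else 0)]) [0])
        = (PySem.List.pyRange 0 ((t : Int) + 1) 1).map (fun b => pvC m h_ (x + 1) b) := by
  intro t
  induction t with
  | zero =>
    intro _
    have h1 : PySem.List.pyRange 0 1 = [(0:Int)] := by
      simpa using PySem.List.pyRange_one_singleton (a := (0:Int))
    simp [h1, pvC_b0]
  | succ t ih =>
    intro ht
    have ht' : (t : Int) ≤ cols := by push_cast at ht ⊢; omega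
    rw [List.range_succ, List.foldl_append, ih ht']
    simp only [List.foldl_cons, List.foldl_nil]
    have e1 : PySem.List.pyGetD (pvRowC m h_ cols x) ((t : Int) + 1) 0 = pvC m h_ x ((t : Int) + 1) := by
      unfold pvRowC
      exact PySem.List.pyGetD_map_pyRange_of_nonneg _ _ _ _ (by positivity) (by push_cast at ht ⊢; omega)
    have e2 : PySem.List.pyGetD (pvRowC m h_ cols x) ((t : Int)) 0 = pvC m h_ x (t : Int) := by
      unfold pvRowC
      exact PySem.List.pyGetD_map_pyRange_of_nonneg _ _ _ _ (by positivity) (by push_cast at ht ⊢; omega)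
    have e3 : PySem.List.pyGetD ((PySem.List.pyRange 0 ((t : Int) + 1) 1).map (fun b => pvC m h_ (x + 1) b)) ((t : Int)) 0 = pvC m h_ (x + 1) (t : Int) :=
      PySem.List.pyGetD_map_pyRange_of_nonneg _ _ _ _ (by positivity) (by omega)
    rw [e1, e2, e3]
    have hrec := pvC_rec m h_ (x := x) (y := (t : Int)) hx (by positivity)
    have e4 : pvC m h_ x ((t:Int) + 1) + pvC m h_ (x + 1) (t:Int) - pvC m h_ x (t:Int)
        + pvInd m h_ x (t:Int) = pvC m h_ (x + 1) ((t:Int) + 1) := by rw [hrec]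
    have e5 : PySem.List.pyRange 0 (((t:Int) + 1) + 1) 1
        = PySem.List.pyRange 0 ((t : Int) + 1) 1 ++ [(t : Int) + 1] :=
      PySem.List.pyRange_one_succ_right (by positivity)
    push_cast
    rw [e5, List.map_append]
    simp only [List.map_cons, List.map_nil]
    congr 1
    rw [← e4]
    unfold pvInd
    rfl

lemma pvBuildRow_eq' (m : List (List Int)) (h_ : Int) {cols x : Int} (hc : 0 ≤ cols) (hx : 0 ≤ x) :
    pvBuildRow m h_ cols x (pvRowC m h_ cols x) = pvRowC m h_ cols (x + 1) := by
  unfold pvBuildRow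
  obtain ⟨n, rfl⟩ : ∃ n : Nat, (n : Int) = cols := ⟨cols.toNat, Int.toNat_of_nonneg hc⟩
  rw [PySem.List.pyRange_zero_natCast n, List.foldl_map]
  conv_rhs => unfold pvRowC
  exact pvBuildRow_aux m h_ n x hx n (le_refl _)

lemma pvC_a0 (m : List (List Int)) (h_ b : Int) : pvC m h_ 0 b = 0 := by
  unfold pvC
  rw [PySem.List.pyRange_one_eq_nil (le_refl 0)]
  simp

lemma pvP_aux (m : List (List Int)) (h_ : Int) (cols : Int) (hc : 0 ≤ cols) :
    ∀ t : Nat,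
      ((List.range t).foldl (fun P (x : Nat) =>
          P ++ [pvBuildRow m h_ cols (x : Int) (PySem.List.pyGetD P (x : Int) [])])
        [List.replicate (cols + 1).toNat 0])
      = (PySem.List.pyRange 0 ((t : Int) + 1) 1).map (fun a => pvRowC m h_ cols a) := by
  intro t
  induction t with
  | zero =>
    have h1 : PySem.List.pyRange 0 1 = [(0:Int)] := by
      simpa using PySem.List.pyRange_one_singleton (a := (0:Int))
    simp [h1, pvRowC, pvC_a0, List.map_const', PySem.List.length_pyRange_one]
  | succ t ih =>
    rw [List.range_succ, List.foldl_append, ih]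
    simp only [List.foldl_cons, List.foldl_nil]
    have e1 : PySem.List.pyGetD ((PySem.List.pyRange 0 ((t : Int) + 1) 1).map (fun a => pvRowC m h_ cols a)) (t : Int) [] = pvRowC m h_ cols (t : Int) :=
      PySem.List.pyGetD_map_pyRange_of_nonneg _ _ _ _ (by positivity) (by omega)
    rw [e1, pvBuildRow_eq' m h_ hc (by positivity)]
    have e5 : PySem.List.pyRange 0 (((t:Int) + 1) + 1) 1
        = PySem.List.pyRange 0 ((t : Int) + 1) 1 ++ [(t : Int) + 1] :=
      PySem.List.pyRange_one_succ_right (by positivity)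
    push_cast
    rw [e5, List.map_append]
    rfl

lemma pvP_eq' (m : List (List Int)) (h_ : Int) {rows cols : Int} (hr : 0 ≤ rows) (hc : 0 ≤ cols) :
    ((PySem.List.pyRange 0 rows 1).foldl
        (fun P x => P ++ [pvBuildRow m h_ cols x (PySem.List.pyGetD P x [])])
        [List.replicate (cols + 1).toNat 0])
      = (PySem.List.pyRange 0 (rows + 1) 1).map (fun a => pvRowC m h_ cols a) := by
  obtain ⟨n, rfl⟩ : ∃ n : Nat, (n : Int) = rows := ⟨rows.toNat, Int.toNat_of_nonneg hr⟩
  rw [PySem.List.pyRange_zero_natCast n, List.foldl_map]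
  exact pvP_aux m h_ cols hc n

lemma pvCollapse' {α : Type} (rows cols i j : Int) (hi : 0 ≤ i) (hir : i < rows)
    (hj : 0 ≤ j) (hjc : j < cols) (g : α → Int → α) (st : α) :
    ((PySem.List.pyRange 0 rows 1).foldl (fun st kk =>
        (PySem.List.pyRange 0 cols 1).foldl (fun st l =>
          if kk - i = l - j ∧ kk - i ≥ 0 then g st (kk - i + 1) else st) st) st)
      = (PySem.List.pyRange 1 (min (rows - i) (cols - j) + 1) 1).foldl g st := by
  have hinner : ∀ (acc : α), ∀ kk ∈ PySem.List.pyRange 0 rows 1,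
      ((PySem.List.pyRange 0 cols 1).foldl (fun st l =>
          if kk - i = l - j ∧ kk - i ≥ 0 then g st (kk - i + 1) else st) acc)
        = if i ≤ kk ∧ kk < i + (cols - j) then g acc (kk - i + 1) else acc := by
    intro acc kk _
    by_cases hcond : i ≤ kk ∧ kk < i + (cols - j)
    · obtain ⟨hk1, hk2⟩ := hcond
      rw [PySem.List.pyRange_one_append 0 (j + (kk - i)) cols (by omega) (by omega),
          PySem.List.pyRange_one_cons (show j + (kk - i) < cols by omega), List.foldl_append]
      rw [PySem.List.foldl_congr_mem _ _ (fun st _ => st) acc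
            (by intro a l hl; rw [PySem.List.mem_pyRange_one] at hl; rw [if_neg (by omega)]),
          PySem.List.foldl_ignore]
      simp only [List.foldl_cons]
      rw [if_pos ⟨by omega, by omega⟩]
      rw [PySem.List.foldl_congr_mem _ _ (fun st _ => st) _
            (by intro a l hl; rw [PySem.List.mem_pyRange_one] at hl; rw [if_neg (by omega)]),
          PySem.List.foldl_ignore, if_pos ⟨hk1, hk2⟩]
    · rw [PySem.List.foldl_congr_mem _ _ (fun st _ => st) acc
            (by intro a l hl; rw [PySem.List.mem_pyRange_one] at hl; rw [if_neg (by omega)]),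
          PySem.List.foldl_ignore, if_neg hcond]
  rw [PySem.List.foldl_congr_mem _ _
        (fun acc kk => if i ≤ kk ∧ kk < i + (cols - j) then g acc (kk - i + 1) else acc) st hinner]
  have h2 : i ≤ min rows (i + (cols - j)) := by omega
  have h3 : min rows (i + (cols - j)) ≤ rows := min_le_left _ _
  rw [PySem.List.pyRange_one_append 0 i rows hi (by omega), List.foldl_append,
      PySem.List.foldl_congr_mem _ _ (fun acc _ => acc) st
        (by intro a kk hkk; rw [PySem.List.mem_pyRange_one] at hkk; rw [if_neg (by omega)]),
      PySem.List.foldl_ignore]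
  rw [PySem.List.pyRange_one_append i (min rows (i + (cols - j))) rows h2 h3, List.foldl_append,
      PySem.List.foldl_congr_mem (PySem.List.pyRange (min rows (i + (cols - j))) rows 1) _
        (fun acc _ => acc) _
        (by intro a kk hkk; rw [PySem.List.mem_pyRange_one] at hkk; rw [if_neg (by omega)]),
      PySem.List.foldl_ignore]
  rw [PySem.List.foldl_congr_mem _ _ (fun acc kk => g acc (kk - i + 1)) st
        (by intro a kk hkk; rw [PySem.List.mem_pyRange_one] at hkk; rw [if_pos (by omega)])]
  rw [PySem.List.pyRange_one i (min rows (i + (cols - j))), List.foldl_map,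
      PySem.List.pyRange_one 1 (min (rows - i) (cols - j) + 1), List.foldl_map]
  have hnn : (min rows (i + (cols - j)) - i).toNat = (min (rows - i) (cols - j) + 1 - 1).toNat := by
    omega
  rw [hnn]
  apply PySem.List.foldl_congr_mem
  intro acc t _
  have e : i + (t : Int) - i + 1 = 1 + (t : Int) := by ring
  rw [e]

lemma pvP_at (m : List (List Int)) (h_ : Int) {rows cols a b : Int}
    (ha0 : 0 ≤ a) (har : a ≤ rows) (hb0 : 0 ≤ b) (hbc : b ≤ cols) :
    pvIdx ((PySem.List.pyRange 0 (rows + 1) 1).map (fun a => pvRowC m h_ cols a)) a b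
      = pvC m h_ a b := by
  unfold pvIdx
  rw [PySem.List.pyGetD_map_pyRange_of_nonneg _ _ _ _ ha0 (by omega)]
  unfold pvRowC
  rw [PySem.List.pyGetD_map_pyRange_of_nonneg _ _ _ _ hb0 (by omega)]

lemma pvFoldl_hom_mem {α β γ : Type} (φ : α → β) (l : List γ) (fA : α → γ → α) (fB : β → γ → β)
    (h : ∀ st x, x ∈ l → fB (φ st) x = φ (fA st x)) (init : α) :
    l.foldl fB (φ init) = φ (l.foldl fA init) := by
  induction l generalizing init with
  | nil => rfl
  | cons a t ih =>
    simp only [List.foldl_cons]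
    rw [h init a (by simp)]
    exact ih (fun st x hx => h st x (by simp [hx])) _

def pvPhi (st : Option Int × Option Int × Option Int × Option Int × Int) :
    Int × (Option Int × Option Int × Option Int × Option Int) :=
  (st.2.2.2.2, (st.1, st.2.1, st.2.2.1, st.2.2.2.1))

lemma pvLoops (matrix : List (List Int)) (h_ k rows cols : Int) (hr : 0 ≤ rows) (hc : 0 ≤ cols) :
    ((PySem.List.pyRange 0 rows 1).foldl (fun st i =>
        (PySem.List.pyRange 0 cols 1).foldl (fun st j =>
          (PySem.List.pyRange 1 (min (rows - i) (cols - j) + 1) 1).foldl (fun st s =>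
            if pvIdx ((PySem.List.pyRange 0 (rows + 1) 1).map (fun a => pvRowC matrix h_ cols a)) (i + s) (j + s)
               - pvIdx ((PySem.List.pyRange 0 (rows + 1) 1).map (fun a => pvRowC matrix h_ cols a)) i (j + s)
               - pvIdx ((PySem.List.pyRange 0 (rows + 1) 1).map (fun a => pvRowC matrix h_ cols a)) (i + s) j
               + pvIdx ((PySem.List.pyRange 0 (rows + 1) 1).map (fun a => pvRowC matrix h_ cols a)) i j ≤ k
               ∧ s ≥ st.1 then
              (s, (some (i + 1), some (j + 1), some (i + s), some (j + s)))
            else st) st) st)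
      ((0, (none, none, none, none)) : Int × (Option Int × Option Int × Option Int × Option Int)))
    = pvPhi ((PySem.List.pyRange 0 rows 1).foldl (fun st i =>
        (PySem.List.pyRange 0 cols 1).foldl (fun st j =>
          (PySem.List.pyRange 0 rows 1).foldl (fun st kk =>
            (PySem.List.pyRange 0 cols 1).foldl (fun st l =>
              if kk - i = l - j ∧ kk - i ≥ 0 then
                if ((PySem.List.pyRange i (i + (kk - i + 1)) 1).foldl (fun c x =>
                    (PySem.List.pyRange j (j + (kk - i + 1)) 1).foldl (fun c y =>
                      if pvIdx matrix x y < h_ then c + 1 else c) c) 0) ≤ k then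
                  if kk - i + 1 ≥ st.2.2.2.2 then
                    (some (i + 1), some (j + 1), some (i + (kk - i + 1)), some (j + (kk - i + 1)), kk - i + 1)
                  else st
                else st
              else st) st) st) st)
      ((none, none, none, none, 0) :
        Option Int × Option Int × Option Int × Option Int × Int)) := by
  refine pvFoldl_hom_mem pvPhi _ _ _ ?_ (none, none, none, none, 0)
  intro st i hi
  rw [PySem.List.mem_pyRange_one] at hi
  refine pvFoldl_hom_mem pvPhi _ _ _ ?_ st
  intro st j hj
  rw [PySem.List.mem_pyRange_one] at hj
  rw [pvCollapse' rows cols i j hi.1 hi.2 hj.1 hj.2 (fun st s =>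
      if ((PySem.List.pyRange i (i + s) 1).foldl (fun c x =>
          (PySem.List.pyRange j (j + s) 1).foldl (fun c y =>
            if pvIdx matrix x y < h_ then c + 1 else c) c) 0) ≤ k then
        if s ≥ st.2.2.2.2 then
          (some (i + 1), some (j + 1), some (i + s), some (j + s), s)
        else st
      else st) st]
  refine pvFoldl_hom_mem pvPhi _ _ _ ?_ st
  intro st s hs
  rw [PySem.List.mem_pyRange_one] at hs
  have hb1 : (0:Int) ≤ i + s := by omega
  have hb2 : i + s ≤ rows := by omega
  have hb3 : (0:Int) ≤ j + s := by omega
  have hb4 : j + s ≤ cols := by omega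
  rw [pvP_at matrix h_ hb1 hb2 hb3 hb4,
      pvP_at matrix h_ hi.1 (by omega) hb3 hb4,
      pvP_at matrix h_ hb1 hb2 hj.1 (by omega),
      pvP_at matrix h_ hi.1 (by omega) hj.1 (by omega),
      pvCntA_eq matrix h_ i j s,
      ← pvC_rect matrix h_ hi.1 hj.1 (by omega)]
  by_cases h1 : pvC matrix h_ (i + s) (j + s) - pvC matrix h_ i (j + s)
      - pvC matrix h_ (i + s) j + pvC matrix h_ i j ≤ k
  · by_cases h2 : s ≥ st.2.2.2.2
    · simp [pvPhi, h1, h2]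
    · simp [pvPhi, h1, h2]
  · simp [pvPhi, h1]

theorem pvMain (matrix : List (List Int)) (h_ k : Int) :
    alg6 matrix h_ k = alg6_alt matrix h_ k := by
  simp only [alg6, alg6_alt]
  rw [pvP_eq' matrix h_ (Int.natCast_nonneg _) (Int.natCast_nonneg _)]
  rw [pvLoops matrix h_ k _ _ (Int.natCast_nonneg _) (Int.natCast_nonneg _)]
  rfl

-- ===== VERDICT (by name: the statement is the Claim_ definition above) =====
theorem alg6_spec : Claim_equal_alg6 := by
  intro matrix h_ k _ _
  unfold Spec_alg6
  exact pvMain matrix h_ k
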